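-- pv_equiv track=rewrite | github.com/jfvitas/ProteoSphereV2 | execution/acquire/intact_snapshot.py | _primary_join_id
-- ===== SOURCE A (Python) =====
-- def _primary_join_id(values: tuple[str, ...]) -> tuple[str, str]:
--     for namespace in ("uniprotkb", "refseq"):
--         for item in values:
--             if ":" not in item:
--                 continue
--             ns, identifier = item.split(":", 1)
--             if ns.strip().casefold() == namespace:
--                 return namespace, identifier.strip().upper()
--     for item in values:
--         if ":" in item:
--             ns, identifier = item.split(":", 1)
--             return ns.strip().casefold(), identifier.strip().upper()
--     return "", ""
-- ===== SOURCE B (Python) =====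
-- def _primary_join_id(values: tuple[str, ...]) -> tuple[str, str]:
--     # One pass: remember first uniprotkb id, first refseq id, and first colon item.
--     uni = None
--     ref = None
--     first = None
--     for item in values:
--         if ":" not in item:
--             continue
--         ns, identifier = item.split(":", 1)
--         ns_cf = ns.strip().casefold()
--         id_up = identifier.strip().upper()
--         if first is None:
--             first = (ns_cf, id_up)
--         if uni is None and ns_cf == "uniprotkb":
--             uni = id_up
--         if ref is None and ns_cf == "refseq":
--             ref = id_up
--     if uni is not None:
--         return "uniprotkb", uni
--     if ref is not None:
--         return "refseq", ref
--     if first is not None: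
--         return first
--     return "", ""
-- ===== Notes on version B (the rewrite author's own statement) =====
-- stated objective: alternative
-- what changed: Replaces A's three sequential scans of values (one per priority namespace plus a fallback scan) with a single pass that records first-match slots for uniprotkb, refseq and the first colon-bearing item, followed by a priority lookup.
import Mathlib
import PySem

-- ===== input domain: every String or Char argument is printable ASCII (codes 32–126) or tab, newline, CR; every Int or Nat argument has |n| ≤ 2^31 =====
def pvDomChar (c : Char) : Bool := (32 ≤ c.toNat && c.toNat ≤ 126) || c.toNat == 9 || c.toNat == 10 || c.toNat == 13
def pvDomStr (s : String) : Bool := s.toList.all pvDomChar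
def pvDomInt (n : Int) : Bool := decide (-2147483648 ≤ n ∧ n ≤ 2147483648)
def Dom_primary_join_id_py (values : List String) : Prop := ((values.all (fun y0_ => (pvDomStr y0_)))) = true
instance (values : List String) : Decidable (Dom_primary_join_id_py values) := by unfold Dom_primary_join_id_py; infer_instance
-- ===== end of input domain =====

-- B replaces A's three scans over `values` by one pass keeping first-match slots; equal result proved on Dom.


-- shared parsing helper: `ns, identifier = item.split(":", 1)` (guarded by `":" in item`)
def pvSplit1 (item : String) : String × String :=
  match PySem.Str.splitMax? item ":" 1 with
  | some (ns :: identifier :: _) => (ns, identifier)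
  | _ => ("", "")

-- ===== PORT A =====
-- inner `for item in values` of the first loop (str.casefold = str.lower on the ASCII domain)
def aScanNs (ns : String) : List String → Option (String × String)
  | [] => none
  | item :: rest =>
    if PySem.Str.isIn ":" item then
      let p := pvSplit1 item
      if PySem.Str.lower (PySem.Str.strip p.1) == ns then
        some (ns, PySem.Str.upper (PySem.Str.strip p.2))
      else aScanNs ns rest
    else aScanNs ns rest

-- outer `for namespace in ("uniprotkb", "refseq")`
def aOuter (values : List String) : List String → Option (String × String)
  | [] => none
  | ns :: rest =>
    match aScanNs ns values with
    | some r => some r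
    | none => aOuter values rest

-- second `for item in values` (the fallback loop)
def aFallback : List String → Option (String × String)
  | [] => none
  | item :: rest =>
    if PySem.Str.isIn ":" item then
      let p := pvSplit1 item
      some (PySem.Str.lower (PySem.Str.strip p.1), PySem.Str.upper (PySem.Str.strip p.2))
    else aFallback rest

def primary_join_id_py (values : List String) : String × String :=
  match aOuter values ["uniprotkb", "refseq"] with
  | some r => r
  | none =>
    match aFallback values with
    | some r => r
    | none => ("", "")

-- ===== PORT B =====
-- single pass with three first-match slots, then the priority lookup
def bLoop : List String → Option String → Option String → Option (String × String) → String × String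
  | [], uni, ref, first =>
    match uni with
    | some u => ("uniprotkb", u)
    | none =>
      match ref with
      | some r => ("refseq", r)
      | none => first.getD ("", "")
  | item :: rest, uni, ref, first =>
    if PySem.Str.isIn ":" item then
      let p := pvSplit1 item
      let nscf := PySem.Str.lower (PySem.Str.strip p.1)
      let idup := PySem.Str.upper (PySem.Str.strip p.2)
      let first' := if first.isNone then some (nscf, idup) else first
      let uni' := if uni.isNone && (nscf == "uniprotkb") then some idup else uni
      let ref' := if ref.isNone && (nscf == "refseq") then some idup else ref
      bLoop rest uni' ref' first'
    else bLoop rest uni ref first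

def primary_join_id_py_alt (values : List String) : String × String :=
  bLoop values none none none

-- ===== PRECONDITION & SPEC =====
def Spec_primary_join_id_py (values : List String) (out : String × String) : Prop := out = primary_join_id_py_alt values
instance (values : List String) (out : String × String) : Decidable (Spec_primary_join_id_py values out) := by unfold Spec_primary_join_id_py; infer_instance

-- ===== CLAIM (what is proved, stated in full; the proofs are below) =====
def Claim_equal_primary_join_id_py : Prop := ∀ (values : List String), Dom_primary_join_id_py values → Spec_primary_join_id_py values (primary_join_id_py values)

-- ===== LEMMAS AND PROOFS =====

-- first-wins combination of two optional results
def pvOr {α : Type} (a b : Option α) : Option α :=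
  match a with
  | some x => some x
  | none => b

-- finalization shared shape
def pvFinal (uni ref : Option String) (first : Option (String × String)) : String × String :=
  match uni with
  | some u => ("uniprotkb", u)
  | none =>
    match ref with
    | some r => ("refseq", r)
    | none => first.getD ("", "")

theorem pvOr_slot (uni : Option String) (b : Bool) (v : String) (u : Option String) :
    pvOr (if uni.isNone && b then some v else uni) u = pvOr uni (if b then some v else u) := by
  cases uni <;> cases b <;> simp [pvOr]

theorem map_snd_ite (b : Bool) (p : String × String) (o : Option (String × String)) :
    Option.map Prod.snd (if b then some p else o) = if b then some p.2 else Option.map Prod.snd o := by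
  cases b <;> simp

theorem aScanNs_fst (ns : String) : ∀ (values : List String) (r : String × String),
    aScanNs ns values = some r → r.1 = ns := by
  intro values
  induction values with
  | nil => intro r h; simp [aScanNs] at h
  | cons item rest ih =>
    intro r h
    simp only [aScanNs] at h
    split at h
    · split at h
      · cases h; rfl
      · exact ih r h
    · exact ih r h

theorem bLoop_eq : ∀ (values : List String) (uni ref : Option String) (first : Option (String × String)),
    bLoop values uni ref first =
      pvFinal (pvOr uni (Option.map Prod.snd (aScanNs "uniprotkb" values)))
              (pvOr ref (Option.map Prod.snd (aScanNs "refseq" values)))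
              (pvOr first (aFallback values)) := by
  intro values
  induction values with
  | nil =>
    intro uni ref first
    simp only [bLoop, aScanNs, aFallback, Option.map_none]
    cases uni <;> cases ref <;> cases first <;> rfl
  | cons item rest ih =>
    intro uni ref first
    by_cases hc : PySem.Str.isIn ":" item = true
    · simp only [bLoop, aScanNs, aFallback, hc, if_true, ih]
      rw [map_snd_ite, map_snd_ite, pvOr_slot, pvOr_slot]
      congr 1
      generalize PySem.Str.lower (PySem.Str.strip (pvSplit1 item).1) = a
      generalize PySem.Str.upper (PySem.Str.strip (pvSplit1 item).2) = b
      cases first with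
      | none => cases aFallback rest <;> rfl
      | some p => rfl
    · simp only [Bool.not_eq_true] at hc
      simp only [bLoop, aScanNs, aFallback, hc, Bool.false_eq_true, if_false, ih]

-- ===== VERDICT (by name: the statement is the Claim_ definition above) =====
theorem primary_join_id_py_spec : Claim_equal_primary_join_id_py := by
  intro values _
  unfold Spec_primary_join_id_py primary_join_id_py primary_join_id_py_alt
  rw [bLoop_eq]
  simp only [aOuter, pvOr, pvFinal]
  cases hu : aScanNs "uniprotkb" values with
  | some r =>
    have h1 : r.1 = "uniprotkb" := aScanNs_fst _ _ _ hu
    simp only [Option.map_some]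
    rw [← h1]
  | none =>
    simp only [Option.map_none]
    cases hr : aScanNs "refseq" values with
    | some r =>
      have h1 : r.1 = "refseq" := aScanNs_fst _ _ _ hr
      simp only [Option.map_some]
      rw [← h1]
    | none =>
      simp only [Option.map_none]
      cases aFallback values <;> rfl
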